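-- pv_equiv track=rewrite | github.com/qe-team/marmot | marmot/representations/segmentation_double_representation_generator.py | get_segments_from_line
-- ===== SOURCE A (Python) =====
-- def get_segments_from_line(line):
--     seg = line.strip('\n').split(' || ')
--     cur_words, cur_seg = [], []
--     cur_pos = 0
--     for seg in line.strip('\n').split(' || '):
--         seg_split = seg.split()
--         cur_words.extend(seg_split)
--         cur_seg.append((cur_pos, cur_pos + len(seg_split)))
--         cur_pos += len(seg_split)
--     return cur_words, cur_seg
-- ===== SOURCE B (Python) =====
-- def get_segments_from_line(line):
--     segs = [s.split() for s in line.strip('\n').split(' || ')]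
--     lens = [len(s) for s in segs]
--     bounds = [0]
--     for n in lens:
--         bounds.append(bounds[-1] + n)
--     words = [w for s in segs for w in s]
--     return words, list(zip(bounds, bounds[1:]))
-- ===== Notes on version B (the rewrite author's own statement) =====
-- stated objective: alternative
-- what changed: Replaces the single running-counter pass with materialized per-segment token lists, a flatten for the words, and a prefix-sum bounds table zipped with its tail for the ranges.
import Mathlib
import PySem

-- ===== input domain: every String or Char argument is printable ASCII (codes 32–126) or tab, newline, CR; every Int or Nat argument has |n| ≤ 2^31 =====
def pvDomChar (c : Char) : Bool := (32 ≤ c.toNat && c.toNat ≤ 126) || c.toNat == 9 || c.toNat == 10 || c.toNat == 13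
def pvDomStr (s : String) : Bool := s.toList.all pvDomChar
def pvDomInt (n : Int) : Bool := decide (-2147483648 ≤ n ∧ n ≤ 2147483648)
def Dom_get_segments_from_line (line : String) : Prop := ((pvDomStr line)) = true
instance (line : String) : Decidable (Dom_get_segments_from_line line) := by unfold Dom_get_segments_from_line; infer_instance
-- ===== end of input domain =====

-- B builds the ranges from a prefix-sum bounds table zipped with its tail instead of A's running counter; objective: alternative decomposition.

-- ===== PORT A =====
def get_segments_from_line (line : String) : List String × (List (Int × Int)) :=
  -- line.strip('\n').split(' || '): the separator is the non-empty literal, so split? is always some (none only for sep = "")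
  -- for seg in …: running state (cur_words, cur_seg, cur_pos)
  let st := ((PySem.Str.split? (PySem.Str.stripChars line "\n") " || ").getD []).foldl
    (fun (st : List String × List (Int × Int) × Int) seg =>
      let seg_split := PySem.Str.split₀ seg
      (st.1 ++ seg_split,
       st.2.1 ++ [(st.2.2, st.2.2 + (seg_split.length : Int))],
       st.2.2 + (seg_split.length : Int)))
    ([], [], 0)
  (st.1, st.2.1)

-- ===== PORT B =====
def get_segments_from_line_alt (line : String) : List String × (List (Int × Int)) :=
  -- same non-empty-separator split; bounds[-1] on the never-empty bounds list is getLast?.getD 0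
  let segs := ((PySem.Str.split? (PySem.Str.stripChars line "\n") " || ").getD []).map PySem.Str.split₀
  let lens := segs.map (fun s => (s.length : Int))
  let bounds := lens.foldl (fun b n => b ++ [(b.getLast?.getD 0) + n]) [0]
  let words := segs.flatMap id
  (words, List.zip bounds (PySem.List.slice bounds (some 1) none))

-- ===== PRECONDITION & SPEC =====
def Spec_get_segments_from_line (line : String) (out : List String × (List (Int × Int))) : Prop := out = get_segments_from_line_alt line
instance (line : String) (out : List String × (List (Int × Int))) : Decidable (Spec_get_segments_from_line line out) := by unfold Spec_get_segments_from_line; infer_instance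

-- ===== CLAIM (what is proved, stated in full; the proofs are below) =====
def Claim_equal_get_segments_from_line : Prop := ∀ (line : String), Dom_get_segments_from_line line → Spec_get_segments_from_line line (get_segments_from_line line)

-- ===== LEMMAS AND PROOFS =====

/-- The (start,end) range list starting at position `p` for segment lengths `l`. -/
def pvRanges (p : Int) : List Int → List (Int × Int)
  | [] => []
  | n :: t => (p, p + n) :: pvRanges (p + n) t

/-- The strictly-after-0 prefix sums starting from `p`. -/
def pvTB (p : Int) : List Int → List Int
  | [] => []
  | n :: t => (p + n) :: pvTB (p + n) t

theorem pvFoldA (l : List String) (w : List String) (s : List (Int × Int)) (p : Int) :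
    l.foldl (fun (st : List String × List (Int × Int) × Int) seg =>
      let seg_split := PySem.Str.split₀ seg
      (st.1 ++ seg_split,
       st.2.1 ++ [(st.2.2, st.2.2 + (seg_split.length : Int))],
       st.2.2 + (seg_split.length : Int))) (w, s, p)
    = (w ++ l.flatMap PySem.Str.split₀,
       s ++ pvRanges p (l.map (fun x => ((PySem.Str.split₀ x).length : Int))),
       p + ((l.map (fun x => ((PySem.Str.split₀ x).length : Int))).sum)) := by
  induction l generalizing w s p with
  | nil => simp [pvRanges]
  | cons a t ih => simp [List.foldl_cons, ih, pvRanges, add_assoc]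

theorem pvFoldB (l : List Int) (rest : List Int) (p : Int) :
    l.foldl (fun b n => b ++ [(b.getLast?.getD 0) + n]) (rest ++ [p])
    = rest ++ [p] ++ pvTB p l := by
  induction l generalizing rest p with
  | nil => simp [pvTB]
  | cons n t ih =>
      simp only [List.foldl_cons, List.getLast?_append, List.getLast?_singleton,
        Option.some_or, Option.getD_some, pvTB]
      rw [ih (rest ++ [p]) (p + n)]
      simp
  
theorem pvZipTB (p : Int) (l : List Int) :
    List.zip (p :: pvTB p l) (pvTB p l) = pvRanges p l := by
  induction l generalizing p with
  | nil => simp [pvTB, pvRanges]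
  | cons n t ih =>
      have h := ih (p + n)
      simp only [List.zip] at h ⊢
      simp [pvTB, pvRanges, h]

theorem pvMain (L : List String) :
    (let st := L.foldl
        (fun (st : List String × List (Int × Int) × Int) seg =>
          let seg_split := PySem.Str.split₀ seg
          (st.1 ++ seg_split,
           st.2.1 ++ [(st.2.2, st.2.2 + (seg_split.length : Int))],
           st.2.2 + (seg_split.length : Int)))
        ([], [], 0)
     (st.1, st.2.1))
    = (let segs := L.map PySem.Str.split₀
       let lens := segs.map (fun s => (s.length : Int))
       let bounds := lens.foldl (fun b n => b ++ [(b.getLast?.getD 0) + n]) [0]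
       let words := segs.flatMap id
       (words, List.zip bounds (PySem.List.slice bounds (some 1) none))) := by
  have hA := pvFoldA L [] [] 0
  have hB := pvFoldB ((L.map PySem.Str.split₀).map (fun s => (s.length : Int))) [] 0
  simp only [List.nil_append] at hB
  simp only [hA, hB, List.nil_append]
  refine Prod.ext ?_ ?_
  · simp [List.flatMap_map]
  · dsimp only
    rw [show ([0] ++ pvTB 0 ((L.map PySem.Str.split₀).map (fun s => (s.length : Int))))
        = 0 :: pvTB 0 ((L.map PySem.Str.split₀).map (fun s => (s.length : Int))) from rfl]
    rw [PySem.List.slice_from _ (by norm_num : (0:Int) ≤ 1)]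
    simp only [Int.toNat_one, List.drop_one, List.tail_cons]
    rw [pvZipTB]
    simp [List.map_map, Function.comp_def]

theorem pvPorts (line : String) : get_segments_from_line line = get_segments_from_line_alt line := by
  unfold get_segments_from_line get_segments_from_line_alt
  exact pvMain _

-- ===== VERDICT (by name: the statement is the Claim_ definition above) =====
theorem get_segments_from_line_spec : Claim_equal_get_segments_from_line := by
  intro line _
  unfold Spec_get_segments_from_line
  exact pvPorts line
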